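-- pv_equiv track=rewrite | github.com/yeison/modular | examples/mojo/extract_mojo_program.py | split_imports
-- ===== SOURCE A (Python) =====
-- def split_imports(contents: list[str]) -> tuple[list[str], list[str]]:
--     """Split the code in the cell into imports and non-imports.
--     We assume that there is no non-import code between import statements.
--     """
--     imports = contents
--     non_imports = []
--     while len(imports) > 0:
--         line = imports.pop()
--         if line.startswith(("from", "import")):
--             imports.append(line)
--             break
--         non_imports.append(line)
--     non_imports = non_imports[::-1]
--     return imports, non_imports
-- ===== SOURCE B (Python) =====
-- def split_imports(contents: list[str]) -> tuple[list[str], list[str]]: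
--     """Split the code in the cell into imports and non-imports."""
--     cut = 0
--     for i in range(len(contents) - 1, -1, -1):
--         if contents[i].startswith(("from", "import")):
--             cut = i + 1
--             break
--     non_imports = contents[cut:]
--     del contents[cut:]
--     return contents, non_imports
-- ===== Notes on version B (the rewrite author's own statement) =====
-- stated objective: simpler
-- what changed: Replaces A's pop/append/re-append loop with accumulator and final reversal by a backward index scan that finds the cut point, then one slice and one in-place deletion.
import Mathlib
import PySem

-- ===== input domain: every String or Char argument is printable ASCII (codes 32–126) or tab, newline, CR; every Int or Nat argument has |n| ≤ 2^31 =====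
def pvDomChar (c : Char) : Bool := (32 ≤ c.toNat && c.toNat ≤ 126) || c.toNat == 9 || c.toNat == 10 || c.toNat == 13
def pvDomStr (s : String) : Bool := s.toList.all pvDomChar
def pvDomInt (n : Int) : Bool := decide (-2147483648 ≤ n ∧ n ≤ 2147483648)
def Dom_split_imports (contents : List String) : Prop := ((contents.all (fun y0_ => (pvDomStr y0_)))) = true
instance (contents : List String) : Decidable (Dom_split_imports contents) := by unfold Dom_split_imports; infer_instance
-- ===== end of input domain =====

-- B replaces A's pop/accumulate/reverse loop by a backward scan for the cut index plus one
-- slice (simpler decomposition); both mutate the argument in place in Python, the theorem here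
-- is about the returned pair of lists.


-- ===== PORT A =====
-- line.startswith(("from", "import"))
def isImportLine (line : String) : Bool :=
  PySem.Str.startswith line "from" || PySem.Str.startswith line "import"

-- the while loop: pop from the end, accumulate popped lines, stop on an import line
def aLoop (imports : List String) (non_imports : List String) :
    List String × List String :=
  if h : imports.length > 0 then
    let line := imports.getLast (by intro he; simp [he] at h)
    let rest := imports.dropLast
    if isImportLine line then (rest ++ [line], non_imports)
    else aLoop rest (non_imports ++ [line])
  else (imports, non_imports)
termination_by imports.length
decreasing_by simp only [List.length_dropLast]; omega

def split_imports (contents : List String) : List String × List String :=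
  let r := aLoop contents []
  (r.1, r.2.reverse)

-- ===== PORT B =====
-- for i in range(len(contents)-1, -1, -1): if contents[i].startswith(...): cut = i+1; break
def bCut (contents : List String) : Nat → Nat
  | 0 => 0
  | n + 1 => if isImportLine (contents.getD n "") then n + 1 else bCut contents n

def split_imports_alt (contents : List String) : List String × List String :=
  let cut := bCut contents contents.length
  (contents.take cut, contents.drop cut)

-- ===== PRECONDITION & SPEC =====
def Spec_split_imports (contents : List String) (out : List String × List String) : Prop := out = split_imports_alt contents
instance (contents : List String) (out : List String × List String) : Decidable (Spec_split_imports contents out) := by unfold Spec_split_imports; infer_instance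

-- ===== CLAIM (what is proved, stated in full; the proofs are below) =====
def Claim_equal_split_imports : Prop := ∀ (contents : List String), Dom_split_imports contents → Spec_split_imports contents (split_imports contents)

-- ===== LEMMAS AND PROOFS =====

theorem bCut_le (xs : List String) (n : Nat) : bCut xs n ≤ n := by
  induction n with
  | zero => simp [bCut]
  | succ n ih =>
    simp only [bCut]
    split
    · exact le_refl _
    · exact Nat.le_succ_of_le ih

theorem bCut_append (ys : List String) (l : String) (n : Nat) (hn : n ≤ ys.length) :
    bCut (ys ++ [l]) n = bCut ys n := by
  induction n with
  | zero => simp [bCut]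
  | succ n ih =>
    have h : (ys ++ [l]).getD n "" = ys.getD n "" := by
      have : n < ys.length := hn
      simp [List.getD, List.getElem?_append_left this]
    simp only [bCut, h]
    split
    · rfl
    · exact ih (Nat.le_of_succ_le hn)

theorem aLoop_eq (xs : List String) (acc : List String) :
    aLoop xs acc =
      (xs.take (bCut xs xs.length),
       acc ++ (xs.drop (bCut xs xs.length)).reverse) := by
  induction xs using List.reverseRecOn generalizing acc with
  | nil => rw [aLoop.eq_def]; simp [bCut]
  | append_singleton ys l ih =>
    have hlen : (ys ++ [l]).length = ys.length + 1 := by simp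
    rw [aLoop.eq_def]
    have hget : (ys ++ [l]).getD ys.length "" = l := by
      simp [List.getD]
    by_cases himp : isImportLine l
    · simp only [hlen]
      rw [dif_pos (by omega)]
      have hlast : (ys ++ [l]).getLast (by simp) = l := by simp
      simp only [hlast, List.dropLast_concat, himp, if_pos]
      simp [bCut, hlen, himp]
    · simp only [hlen]
      rw [dif_pos (by omega)]
      have hlast : (ys ++ [l]).getLast (by simp) = l := by simp
      simp only [hlast, List.dropLast_concat, himp, if_neg, Bool.false_eq_true,
        not_false_iff]
      rw [ih]
      have hcut : bCut (ys ++ [l]) (ys.length + 1) = bCut ys ys.length := by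
        simp [bCut, himp, bCut_append ys l ys.length (le_refl _)]
      have hle := bCut_le ys ys.length
      rw [hcut, List.take_append_of_le_length hle, List.drop_append_of_le_length hle]
      simp

theorem split_eq (contents : List String) :
    split_imports contents = split_imports_alt contents := by
  simp [split_imports, split_imports_alt, aLoop_eq]

-- ===== VERDICT (by name: the statement is the Claim_ definition above) =====
theorem split_imports_spec : Claim_equal_split_imports := by
  intro contents _
  exact split_eq contents
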